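-- pv_equiv track=rewrite | github.com/wituwitu/schc-over-sigfox | utils/schc_utils.py | contains_different_from
-- ===== SOURCE A (Python) =====
-- def contains_different_from(lst, element):
--     if len(lst) == 0:
--         return False
--     if element in lst:
--         res = False
--         for e in lst:
--             if e != element:
--                 res = True
--     else:
--         res = True
--     return res
-- ===== SOURCE B (Python) =====
-- def contains_different_from(lst, element):
--     for e in lst:
--         if e != element:
--             return True
--     return False
-- ===== Notes on version B (the rewrite author's own statement) =====
-- stated objective: simpler
-- what changed: Replaced the empty-guard + membership pre-scan + full non-early-exiting flag loop with a single early-exiting traversal that returns True at the first differing element.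
import Mathlib
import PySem

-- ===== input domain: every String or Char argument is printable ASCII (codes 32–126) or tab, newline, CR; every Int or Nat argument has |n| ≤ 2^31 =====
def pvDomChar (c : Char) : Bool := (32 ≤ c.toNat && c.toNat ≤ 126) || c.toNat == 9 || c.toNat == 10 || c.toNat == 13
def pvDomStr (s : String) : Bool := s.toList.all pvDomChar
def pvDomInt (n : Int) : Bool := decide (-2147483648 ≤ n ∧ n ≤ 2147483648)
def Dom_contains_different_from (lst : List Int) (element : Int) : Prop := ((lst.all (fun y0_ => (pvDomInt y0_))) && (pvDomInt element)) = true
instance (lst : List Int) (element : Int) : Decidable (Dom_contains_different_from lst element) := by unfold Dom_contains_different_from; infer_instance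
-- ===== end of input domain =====

-- B replaces A's two scans (membership test + full flag loop) with one early-exiting pass; objective: simpler.


-- ===== PORT A =====
-- A: empty guard, then membership test, then a full flag-setting loop.
def contains_different_from (lst : List Int) (element : Int) : Bool :=
  if lst.length = 0 then false
  else if element ∈ lst then
    lst.foldl (fun res e => if e ≠ element then true else res) false
  else true

-- ===== PORT B =====
-- B: one early-exiting pass (List.any is the early-exit loop).
def contains_different_from_alt (lst : List Int) (element : Int) : Bool :=
  lst.any (fun e => e ≠ element)

-- ===== PRECONDITION & SPEC =====
def Spec_contains_different_from (lst : List Int) (element : Int) (out : Bool) : Prop := out = contains_different_from_alt lst element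
instance (lst : List Int) (element : Int) (out : Bool) : Decidable (Spec_contains_different_from lst element out) := by unfold Spec_contains_different_from; infer_instance

-- ===== CLAIM (what is proved, stated in full; the proofs are below) =====
def Claim_equal_contains_different_from : Prop := ∀ (lst : List Int) (element : Int), Dom_contains_different_from lst element → Spec_contains_different_from lst element (contains_different_from lst element)

-- ===== LEMMAS AND PROOFS =====

-- ===== VERDICT (by name: the statement is the Claim_ definition above) =====
lemma foldl_flag (element : Int) (lst : List Int) (r : Bool) :
    lst.foldl (fun res e => if e ≠ element then true else res) r
      = (r || lst.any (fun e => e ≠ element)) := by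
  induction lst generalizing r with
  | nil => simp
  | cons a t ih =>
      simp only [List.foldl_cons, List.any_cons, ih]
      by_cases h : a = element <;> simp [h]

theorem contains_different_from_spec : Claim_equal_contains_different_from := by
  intro lst element _
  unfold Spec_contains_different_from contains_different_from contains_different_from_alt
  split_ifs with h1 h2
  · simp [List.length_eq_zero_iff.mp h1]
  · simpa using foldl_flag element lst false
  · cases lst with
    | nil => simp at h1
    | cons a t => simp only [List.any_cons]
                  have : a ≠ element := fun he => h2 (he ▸ List.mem_cons_self)
                  simp [this]
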